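-- pv_equiv track=rewrite | github.com/nershman/SAFFI-Project | digitalsaffiproject/analysis/metrics_helpers.py | get_simple_distance
-- ===== SOURCE A (Python) =====
-- from itertools import product
--
-- def get_simple_distance(doc, product_list, hazard_list, type='min'):
-- 	"""
-- 	Document & product are a list of words.
--
-- 	Returns a distance measure for the selected words in a document.
-- 	"""
-- 	#get relevant terms in the document
-- 	products_intersect = set(product_list).intersection(doc)
-- 	hazards_intersect = set(hazard_list).intersection(doc)
--
-- 	#get indexes of relevant terms in document
-- 	prod_ind = {doc.index(term) for term in products_intersect}
-- 	haz_ind = {doc.index(term) for term in hazards_intersect}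
--
-- 	#mean distance: find sequences of product-hazard pairs and the distance
-- 	#find the first p/h, then find the second p/h and match it and calc distance.
-- 	#continue to do this for each item.
--
-- 	#if a term doesn't appear, return NA.
-- 	if not (prod_ind and haz_ind):
-- 		return None
--
-- 	elif type == 'min':
-- 		vals = min(product(prod_ind, haz_ind), key=lambda t: abs(t[0]-t[1]))
-- 		return abs(vals[0]-vals[1])
--
-- 	elif type == 'mean':
-- 		pass #TODO
-- ===== SOURCE B (Python) =====
-- def get_simple_distance(doc, product_list, hazard_list, type='min'):
--     """One pass over doc to collect first-occurrence indices, then a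
--     sorted two-pointer sweep for the minimum index distance."""
--     pos = {}
--     for i, w in enumerate(doc):
--         if w not in pos:
--             pos[w] = i
--     prod = sorted({pos[w] for w in product_list if w in pos})
--     haz = sorted({pos[w] for w in hazard_list if w in pos})
--     if not prod or not haz:
--         return None
--     if type != 'min':
--         return None
--     best = None
--     i = j = 0
--     while i < len(prod) and j < len(haz):
--         d = abs(prod[i] - haz[j])
--         if best is None or d < best:
--             best = d
--         if prod[i] < haz[j]:
--             i += 1
--         else:
--             j += 1
--     return best
-- ===== Notes on version B (the rewrite author's own statement) =====
-- stated objective: faster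
-- what changed: Replaced the repeated doc.index scans and the exhaustive cartesian-product minimum over all product/hazard index pairs by a single pass over doc that records first-occurrence indices, then a sorted two-pointer sweep that finds the minimum index distance.
import Mathlib
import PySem

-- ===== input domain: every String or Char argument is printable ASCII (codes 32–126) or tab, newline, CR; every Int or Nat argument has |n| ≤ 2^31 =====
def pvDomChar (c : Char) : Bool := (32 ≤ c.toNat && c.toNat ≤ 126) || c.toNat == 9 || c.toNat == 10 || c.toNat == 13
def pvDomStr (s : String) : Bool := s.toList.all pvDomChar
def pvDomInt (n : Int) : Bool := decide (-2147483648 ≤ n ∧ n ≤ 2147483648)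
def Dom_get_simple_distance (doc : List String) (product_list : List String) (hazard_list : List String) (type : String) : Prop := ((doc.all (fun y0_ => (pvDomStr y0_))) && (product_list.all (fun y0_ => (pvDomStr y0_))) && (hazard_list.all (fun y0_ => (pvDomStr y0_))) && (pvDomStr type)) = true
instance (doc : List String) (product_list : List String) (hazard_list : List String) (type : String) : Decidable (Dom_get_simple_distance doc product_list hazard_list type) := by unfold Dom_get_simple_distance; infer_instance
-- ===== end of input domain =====

-- B replaces A's repeated doc.index scans and cartesian-product minimum by a one-pass
-- first-occurrence index map plus a sorted two-pointer sweep (objective: faster).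

-- ===== PORT A =====
-- min(product(P,H), key=...) iterates the two sets in hash order; only |p-h| of the
-- chosen pair is returned, and that value is order-independent, so this port's
-- deterministic pair order is exact for the returned value.
def get_simple_distance (doc : List String) (product_list : List String) (hazard_list : List String) (type : String) : Option Int :=
  let products_intersect := PySem.Set.inter (PySem.Set.ofList product_list) doc
  let hazards_intersect := PySem.Set.inter (PySem.Set.ofList hazard_list) doc
  -- doc.index(term) always succeeds here since every term is in doc; getD 0 is unreachable
  let prod_ind : PySem.Set Int :=
    PySem.Set.ofList (products_intersect.map (fun t => (((PySem.List.index? doc t).getD 0 : Nat) : Int)))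
  let haz_ind : PySem.Set Int :=
    PySem.Set.ofList (hazards_intersect.map (fun t => (((PySem.List.index? doc t).getD 0 : Nat) : Int)))
  if prod_ind = [] ∨ haz_ind = [] then none
  else if type = "min" then
    match PySem.List.min? (prod_ind.flatMap (fun p => haz_ind.map (fun h => (p, h))))
        (fun t => |t.1 - t.2|) with
    | some vals => some |vals.1 - vals.2|
    | none => none
  else none

-- ===== PORT B =====
-- the while loop of Source B: two pointers over the sorted index lists, accumulator `best`
def pvTwoPtr : List Int → List Int → Option Int → Option Int
  | p :: ps, h :: hs, best =>
      let d := |p - h|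
      let best' := match best with
        | none => some d
        | some b => if d < b then some d else some b
      if p < h then pvTwoPtr ps (h :: hs) best' else pvTwoPtr (p :: ps) hs best'
  | _, _, best => best
termination_by a b _ => a.length + b.length

-- the first for-loop of Source B: first-occurrence index of every word of doc
def pvPos (doc : List String) : PySem.Dict String Int :=
  (PySem.List.enumerate doc 0).foldl
    (fun d iw => if d.contains iw.2 then d else d.insert iw.2 iw.1) PySem.Dict.empty

def get_simple_distance_alt (doc : List String) (product_list : List String) (hazard_list : List String) (type : String) : Option Int :=
  let pos := pvPos doc
  let prod := PySem.List.sorted (PySem.Set.ofList (product_list.filterMap (fun w => pos.get? w))) (fun x => x) false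
  let haz := PySem.List.sorted (PySem.Set.ofList (hazard_list.filterMap (fun w => pos.get? w))) (fun x => x) false
  if prod = [] ∨ haz = [] then none
  else if type ≠ "min" then none
  else pvTwoPtr prod haz none

-- ===== PRECONDITION & SPEC =====
def Spec_get_simple_distance (doc : List String) (product_list : List String) (hazard_list : List String) (type : String) (out : Option Int) : Prop := out = get_simple_distance_alt doc product_list hazard_list type
instance (doc : List String) (product_list : List String) (hazard_list : List String) (type : String) (out : Option Int) : Decidable (Spec_get_simple_distance doc product_list hazard_list type out) := by unfold Spec_get_simple_distance; infer_instance

-- ===== CLAIM (what is proved, stated in full; the proofs are below) =====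
def Claim_equal_get_simple_distance : Prop := ∀ (doc : List String) (product_list : List String) (hazard_list : List String) (type : String), Dom_get_simple_distance doc product_list hazard_list type → Spec_get_simple_distance doc product_list hazard_list type (get_simple_distance doc product_list hazard_list type)

-- ===== LEMMAS AND PROOFS =====

/-- `r` is the minimum of |p - h| over p ∈ P, h ∈ H. -/
def IsMinGap (P H : List Int) (r : Int) : Prop :=
  (∃ p ∈ P, ∃ h ∈ H, r = |p - h|) ∧ ∀ p ∈ P, ∀ h ∈ H, r ≤ |p - h|

theorem isMinGap_unique {P H : List Int} {r s : Int}
    (hr : IsMinGap P H r) (hs : IsMinGap P H s) : r = s := by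
  obtain ⟨⟨p, hp, h, hh, hre⟩, hrle⟩ := hr
  obtain ⟨⟨q, hq, g, hg, hse⟩, hsle⟩ := hs
  have h1 := hrle q hq g hg
  have h2 := hsle p hp h hh
  omega

theorem isMinGap_congr {P H P' H' : List Int} {r : Int}
    (hP : ∀ x, x ∈ P ↔ x ∈ P') (hH : ∀ x, x ∈ H ↔ x ∈ H') :
    IsMinGap P H r ↔ IsMinGap P' H' r := by
  unfold IsMinGap
  constructor
  · rintro ⟨⟨p, hp, h, hh, he⟩, hle⟩
    exact ⟨⟨p, (hP p).1 hp, h, (hH h).1 hh, he⟩,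
      fun p hp h hh => hle p ((hP p).2 hp) h ((hH h).2 hh)⟩
  · rintro ⟨⟨p, hp, h, hh, he⟩, hle⟩
    exact ⟨⟨p, (hP p).2 hp, h, (hH h).2 hh, he⟩,
      fun p hp h hh => hle p ((hP p).1 hp) h ((hH h).1 hh)⟩

-- A-side: the min?-over-all-pairs value is the minimum gap
theorem minPairs_isMinGap {P H : List Int} (hP : P ≠ []) (hH : H ≠ []) :
    ∃ t, PySem.List.min? (P.flatMap (fun p => H.map (fun h => (p, h)))) (fun t => |t.1 - t.2|) = some t ∧
      IsMinGap P H |t.1 - t.2| := by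
  obtain ⟨p0, hp0⟩ := List.exists_mem_of_ne_nil P hP
  obtain ⟨h0, hh0⟩ := List.exists_mem_of_ne_nil H hH
  have hne : (p0, h0) ∈ P.flatMap (fun p => H.map (fun h => (p, h))) := by
    simp only [List.mem_flatMap, List.mem_map]
    exact ⟨p0, hp0, h0, hh0, rfl⟩
  obtain ⟨t, ht⟩ : ∃ t, PySem.List.min? (P.flatMap (fun p => H.map (fun h => (p, h)))) (fun t => |t.1 - t.2|) = some t := by
    cases he : PySem.List.min? (P.flatMap (fun p => H.map (fun h => (p, h)))) (fun t => |t.1 - t.2|) with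
    | none => rw [PySem.List.min?_eq_none_iff] at he; rw [he] at hne; simp at hne
    | some t => exact ⟨t, rfl⟩
  refine ⟨t, ht, ?_, ?_⟩
  · have := PySem.List.min?_mem ht
    simp only [List.mem_flatMap, List.mem_map] at this
    obtain ⟨p, hp, h, hh, he⟩ := this
    exact ⟨p, hp, h, hh, by rw [← he]⟩
  · intro p hp h hh
    have := PySem.List.min?_isMin ht (p, h) (by
      simp only [List.mem_flatMap, List.mem_map]
      exact ⟨p, hp, h, hh, rfl⟩)
    exact this

-- B-side: facts about the two-pointer loop
theorem pvTwoPtr_step_pos (p : Int) (ps : List Int) (h : Int) (hs : List Int) (best : Option Int)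
    (hlt : p < h) :
    pvTwoPtr (p :: ps) (h :: hs) best =
      pvTwoPtr ps (h :: hs) (some (match best with | none => |p - h| | some b => min |p - h| b)) := by
  rw [pvTwoPtr.eq_def]
  simp only [if_pos hlt]
  congr 1
  cases best with
  | none => rfl
  | some b =>
      show (if |p - h| < b then some |p - h| else some b) = some (min |p - h| b)
      split_ifs with hdb
      · rw [min_eq_left (by omega)]
      · rw [min_eq_right (by omega)]

theorem pvTwoPtr_step_neg (p : Int) (ps : List Int) (h : Int) (hs : List Int) (best : Option Int)
    (hlt : ¬ p < h) :
    pvTwoPtr (p :: ps) (h :: hs) best =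
      pvTwoPtr (p :: ps) hs (some (match best with | none => |p - h| | some b => min |p - h| b)) := by
  rw [pvTwoPtr.eq_def]
  simp only [if_neg hlt]
  congr 1
  cases best with
  | none => rfl
  | some b =>
      show (if |p - h| < b then some |p - h| else some b) = some (min |p - h| b)
      split_ifs with hdb
      · rw [min_eq_left (by omega)]
      · rw [min_eq_right (by omega)]

theorem pvTwoPtr_nil_left (H : List Int) (best : Option Int) : pvTwoPtr [] H best = best := by
  rw [pvTwoPtr]; intro p ps h hs h1 h2; simp at h1

theorem pvTwoPtr_nil_right (P : List Int) (best : Option Int) : pvTwoPtr P [] best = best := by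
  rw [pvTwoPtr]; intro p ps h hs h1 h2; simp at h2

theorem pvTwoPtr_le_best (P H : List Int) (b r : Int)
    (hres : pvTwoPtr P H (some b) = some r) : r ≤ b := by
  induction P generalizing H b r with
  | nil => rw [pvTwoPtr_nil_left] at hres; simp at hres; omega
  | cons p ps ih =>
    induction H generalizing b r with
    | nil => rw [pvTwoPtr_nil_right] at hres; simp at hres; omega
    | cons h hs ih2 =>
      by_cases hlt : p < h
      · rw [pvTwoPtr_step_pos _ _ _ _ _ hlt] at hres
        have := ih _ _ _ hres
        simp only [min_def] at this; split_ifs at this <;> omega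
      · rw [pvTwoPtr_step_neg _ _ _ _ _ hlt] at hres
        have := ih2 _ _ hres
        simp only [min_def] at this; split_ifs at this <;> omega

theorem pvTwoPtr_total (P H : List Int) (b : Int) :
    ∃ r, pvTwoPtr P H (some b) = some r := by
  induction P generalizing H b with
  | nil => exact ⟨b, pvTwoPtr_nil_left _ _⟩
  | cons p ps ih =>
    induction H generalizing b with
    | nil => exact ⟨b, pvTwoPtr_nil_right _ _⟩
    | cons h hs ih2 =>
      by_cases hlt : p < h
      · rw [pvTwoPtr_step_pos _ _ _ _ _ hlt]; exact ih _ _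
      · rw [pvTwoPtr_step_neg _ _ _ _ _ hlt]; exact ih2 _

theorem pvTwoPtr_sound (P H : List Int) (best : Option Int) (r : Int)
    (hres : pvTwoPtr P H best = some r) :
    best = some r ∨ ∃ p ∈ P, ∃ h ∈ H, r = |p - h| := by
  induction P generalizing H best with
  | nil => rw [pvTwoPtr_nil_left] at hres; exact Or.inl hres
  | cons p ps ih =>
    induction H generalizing best with
    | nil => rw [pvTwoPtr_nil_right] at hres; exact Or.inl hres
    | cons h hs ih2 =>
      by_cases hlt : p < h
      · rw [pvTwoPtr_step_pos _ _ _ _ _ hlt] at hres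
        rcases ih _ _ hres with hb | ⟨p', hp', h', hh', he⟩
        · cases best with
          | none => simp at hb; exact Or.inr ⟨p, by simp, h, by simp, hb.symm⟩
          | some b =>
            simp only [Option.some.injEq] at hb
            rcases min_cases |p - h| b with ⟨he, _⟩ | ⟨he, _⟩
            · exact Or.inr ⟨p, by simp, h, by simp, by omega⟩
            · exact Or.inl (by rw [← hb, he])
        · exact Or.inr ⟨p', List.mem_cons_of_mem _ hp', h', hh', he⟩
      · rw [pvTwoPtr_step_neg _ _ _ _ _ hlt] at hres
        rcases ih2 _ hres with hb | ⟨p', hp', h', hh', he⟩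
        · cases best with
          | none => simp at hb; exact Or.inr ⟨p, by simp, h, by simp, hb.symm⟩
          | some b =>
            simp only [Option.some.injEq] at hb
            rcases min_cases |p - h| b with ⟨he, _⟩ | ⟨he, _⟩
            · exact Or.inr ⟨p, by simp, h, by simp, by omega⟩
            · exact Or.inl (by rw [← hb, he])
        · exact Or.inr ⟨p', hp', h', List.mem_cons_of_mem _ hh', he⟩

theorem pvTwoPtr_lb (P H : List Int) (best : Option Int) (r : Int)
    (hsP : P.Pairwise (· ≤ ·)) (hsH : H.Pairwise (· ≤ ·))
    (hres : pvTwoPtr P H best = some r) :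
    ∀ p ∈ P, ∀ h ∈ H, r ≤ |p - h| := by
  induction P generalizing H best with
  | nil => simp
  | cons p ps ih =>
    induction H generalizing best with
    | nil => simp
    | cons h hs ih2 =>
      rw [List.pairwise_cons] at hsP hsH
      by_cases hlt : p < h
      · rw [pvTwoPtr_step_pos _ _ _ _ _ hlt] at hres
        intro p' hp' h' hh'
        rcases List.mem_cons.1 hp' with rfl | hp'
        · -- p' = p : use r ≤ min ... ≤ |p - h| ≤ |p - h'| since h ≤ h'
          have hrb := pvTwoPtr_le_best _ _ _ _ hres
          have hhh' : h ≤ h' := by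
            rcases List.mem_cons.1 hh' with rfl | hh' ; · omega
            · exact hsH.1 _ hh'
          have : r ≤ |p' - h| := le_trans hrb (by
            cases best with
            | none => exact le_refl _
            | some b => exact min_le_left _ _)
          rcases abs_cases (p' - h) with ⟨e1, _⟩ | ⟨e1, _⟩ <;>
          rcases abs_cases (p' - h') with ⟨e2, _⟩ | ⟨e2, _⟩ <;> omega
        · exact ih _ _ hsP.2 (List.pairwise_cons.2 hsH) hres p' hp' h' hh'
      · rw [pvTwoPtr_step_neg _ _ _ _ _ hlt] at hres
        intro p' hp' h' hh'
        rcases List.mem_cons.1 hh' with rfl | hh'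
        · have hrb := pvTwoPtr_le_best _ _ _ _ hres
          have hpp' : p ≤ p' := by
            rcases List.mem_cons.1 hp' with rfl | hp' ; · omega
            · exact hsP.1 _ hp'
          have : r ≤ |p - h'| := le_trans hrb (by
            cases best with
            | none => exact le_refl _
            | some b => exact min_le_left _ _)
          rcases abs_cases (p - h') with ⟨e1, _⟩ | ⟨e1, _⟩ <;>
          rcases abs_cases (p' - h') with ⟨e2, _⟩ | ⟨e2, _⟩ <;> omega
        · exact ih2 _ hsH.2 hres p' hp' h' hh'

theorem pvTwoPtr_isMinGap {P H : List Int}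
    (hP : P ≠ []) (hH : H ≠ []) (hsP : P.Pairwise (· ≤ ·)) (hsH : H.Pairwise (· ≤ ·)) :
    ∃ r, pvTwoPtr P H none = some r ∧ IsMinGap P H r := by
  obtain ⟨p, ps, rfl⟩ := List.exists_cons_of_ne_nil hP
  obtain ⟨h, hs, rfl⟩ := List.exists_cons_of_ne_nil hH
  obtain ⟨r, hr⟩ : ∃ r, pvTwoPtr (p :: ps) (h :: hs) none = some r := by
    by_cases hlt : p < h
    · rw [pvTwoPtr_step_pos _ _ _ _ _ hlt]; exact pvTwoPtr_total _ _ _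
    · rw [pvTwoPtr_step_neg _ _ _ _ _ hlt]; exact pvTwoPtr_total _ _ _
  refine ⟨r, hr, ?_, pvTwoPtr_lb _ _ _ _ hsP hsH hr⟩
  rcases pvTwoPtr_sound _ _ _ _ hr with hb | hmem
  · simp at hb
  · exact hmem


theorem pvPos_fold_get : ∀ (l : List String) (s : Int) (d : PySem.Dict String Int) (w : String),
    ((PySem.List.enumerate l s).foldl
      (fun d iw => if d.contains iw.2 then d else d.insert iw.2 iw.1) d).get? w
    = match d.get? w with
      | some v => some v
      | none => Option.map (fun (n : Nat) => s + (n : Int)) (PySem.List.index? l w) := by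
  intro l
  induction l with
  | nil =>
    intro s d w
    rw [PySem.List.enumerate_nil]
    simp only [List.foldl_nil]
    cases hgw : d.get? w <;> simp [PySem.List.index?_eq_idxOf?]
  | cons x xs ih =>
    intro s d w
    rw [PySem.List.enumerate_cons, List.foldl_cons, ih]
    by_cases hc : d.contains x = true
    · have hstep : (if d.contains (s, x).2 then d else d.insert (s, x).2 (s, x).1) = d := by
        simp [hc]
      rw [hstep]
      cases hgw : d.get? w with
      | some v => rfl
      | none =>
        have hxw : x ≠ w := by
          rintro rfl
          rw [PySem.Dict.contains_eq_isSome_get?, hgw] at hc; simp at hc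
        show Option.map (fun (n : Nat) => (s + 1) + (n : Int)) (PySem.List.index? xs w)
          = Option.map (fun (n : Nat) => s + (n : Int)) (PySem.List.index? (x :: xs) w)
        rw [PySem.List.index?_cons_of_ne xs hxw]
        cases hi : PySem.List.index? xs w <;> simp
        omega
    · have hstep : (if d.contains (s, x).2 then d else d.insert (s, x).2 (s, x).1) = d.insert x s := by
        simp [hc]
      rw [hstep]
      by_cases hxw : x = w
      · subst hxw
        rw [PySem.Dict.get?_insert_self]
        have hgw : d.get? x = none := by
          rw [PySem.Dict.contains_eq_isSome_get?] at hc
          cases hdx : d.get? x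
          · rfl
          · rw [hdx] at hc; simp at hc
        rw [hgw, PySem.List.index?_cons_self]
        simp
      · rw [PySem.Dict.get?_insert_of_ne d s (Ne.symm hxw)]
        cases hgw : d.get? w with
        | some v => rfl
        | none =>
          show Option.map (fun (n : Nat) => (s + 1) + (n : Int)) (PySem.List.index? xs w)
            = Option.map (fun (n : Nat) => s + (n : Int)) (PySem.List.index? (x :: xs) w)
          rw [PySem.List.index?_cons_of_ne xs hxw]
          cases hi : PySem.List.index? xs w <;> simp
          omega

theorem pvPos_get (doc : List String) (w : String) :
    (pvPos doc).get? w = Option.map (fun (n : Nat) => (n : Int)) (PySem.List.index? doc w) := by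
  rw [pvPos, pvPos_fold_get, PySem.Dict.get?_empty]
  cases hi : PySem.List.index? doc w <;> simp

theorem pv_memAB (doc : List String) (wl : List String) (x : Int) :
    x ∈ wl.filterMap (fun w => (pvPos doc).get? w) ↔
    x ∈ (PySem.Set.inter (PySem.Set.ofList wl) doc).map
        (fun t => (((PySem.List.index? doc t).getD 0 : Nat) : Int)) := by
  rw [List.mem_filterMap, List.mem_map]
  constructor
  · rintro ⟨w, hw, hg⟩
    rw [pvPos_get] at hg
    cases hi : PySem.List.index? doc w with
    | none => rw [hi] at hg; simp at hg
    | some k =>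
      rw [hi] at hg
      simp only [Option.map_some, Option.some.injEq] at hg
      refine ⟨w, ?_, ?_⟩
      · rw [PySem.Set.mem_inter]
        refine ⟨(PySem.Set.mem_ofList wl w).2 hw, ?_⟩
        rw [← PySem.List.index?_isSome_iff, hi]; rfl
      · rw [hi]; simpa using hg
  · rintro ⟨t, ht, he⟩
    rw [PySem.Set.mem_inter] at ht
    obtain ⟨htw, htd⟩ := ht
    refine ⟨t, (PySem.Set.mem_ofList wl t).1 htw, ?_⟩
    rw [pvPos_get]
    obtain ⟨k, hk⟩ := Option.isSome_iff_exists.1 ((PySem.List.index?_isSome_iff doc t).2 htd)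
    rw [hk]
    rw [hk] at he
    simpa using he

-- ===== VERDICT (by name: the statement is the Claim_ definition above) =====
theorem get_simple_distance_spec : Claim_equal_get_simple_distance := by
  intro doc pl hl ty _
  unfold Spec_get_simple_distance
  simp only [get_simple_distance, get_simple_distance_alt]
  have hPmem : ∀ x, x ∈ PySem.List.sorted (PySem.Set.ofList (pl.filterMap (fun w => (pvPos doc).get? w))) (fun x => x) false ↔
      x ∈ PySem.Set.ofList ((PySem.Set.inter (PySem.Set.ofList pl) doc).map
        (fun t => (((PySem.List.index? doc t).getD 0 : Nat) : Int))) := by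
    intro x
    rw [PySem.List.mem_sorted, PySem.Set.mem_ofList, PySem.Set.mem_ofList, pv_memAB]
  have hHmem : ∀ x, x ∈ PySem.List.sorted (PySem.Set.ofList (hl.filterMap (fun w => (pvPos doc).get? w))) (fun x => x) false ↔
      x ∈ PySem.Set.ofList ((PySem.Set.inter (PySem.Set.ofList hl) doc).map
        (fun t => (((PySem.List.index? doc t).getD 0 : Nat) : Int))) := by
    intro x
    rw [PySem.List.mem_sorted, PySem.Set.mem_ofList, PySem.Set.mem_ofList, pv_memAB]
  have hPnil := (List.eq_nil_iff_forall_not_mem.trans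
    ((forall_congr' fun x => not_congr (hPmem x)).trans List.eq_nil_iff_forall_not_mem.symm))
  have hHnil := (List.eq_nil_iff_forall_not_mem.trans
    ((forall_congr' fun x => not_congr (hHmem x)).trans List.eq_nil_iff_forall_not_mem.symm))
  by_cases hE : PySem.Set.ofList ((PySem.Set.inter (PySem.Set.ofList pl) doc).map
        (fun t => (((PySem.List.index? doc t).getD 0 : Nat) : Int))) = [] ∨
      PySem.Set.ofList ((PySem.Set.inter (PySem.Set.ofList hl) doc).map
        (fun t => (((PySem.List.index? doc t).getD 0 : Nat) : Int))) = []
  · rw [if_pos hE, if_pos ((or_congr hPnil hHnil).2 hE)]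
  · rw [if_neg hE, if_neg (fun h => hE ((or_congr hPnil hHnil).1 h))]
    rw [not_or] at hE
    by_cases hty : ty = "min"
    · rw [if_pos hty, if_neg (not_not_intro hty)]
      obtain ⟨t, hmin, hgapA⟩ := minPairs_isMinGap hE.1 hE.2
      rw [hmin]
      obtain ⟨r, hrun, hgapB⟩ := pvTwoPtr_isMinGap (hPnil.not.2 hE.1) (hHnil.not.2 hE.2)
        ((PySem.List.sorted_ofList_pairwise_lt _).imp le_of_lt)
        ((PySem.List.sorted_ofList_pairwise_lt _).imp le_of_lt)
      rw [hrun]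
      show some |t.1 - t.2| = some r
      rw [isMinGap_unique hgapA ((isMinGap_congr hPmem hHmem).1 hgapB)]
    · rw [if_neg hty, if_pos hty]
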